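-- pv_equiv track=rewrite | github.com/zdenekhynek/advent-of-code-2023 | day-4/day_4.py | get_card_score
-- ===== SOURCE A (Python) =====
-- def get_card_score(winning_numbers):
--     score = 0
--     for i in range(len(winning_numbers)):
--         if i == 0:
--             score += 1
--         else:
--             score *= 2
--     return score
-- ===== SOURCE B (Python) =====
-- def get_card_score(winning_numbers):
--     n = len(winning_numbers)
--     return 0 if n == 0 else 2 ** (n - 1)
-- ===== Notes on version B (the rewrite author's own statement) =====
-- stated objective: faster
-- what changed: Replaces the accumulator loop over the list with the closed form 2^(n-1) (0 for an empty list) computed from the length alone.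
import Mathlib
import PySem

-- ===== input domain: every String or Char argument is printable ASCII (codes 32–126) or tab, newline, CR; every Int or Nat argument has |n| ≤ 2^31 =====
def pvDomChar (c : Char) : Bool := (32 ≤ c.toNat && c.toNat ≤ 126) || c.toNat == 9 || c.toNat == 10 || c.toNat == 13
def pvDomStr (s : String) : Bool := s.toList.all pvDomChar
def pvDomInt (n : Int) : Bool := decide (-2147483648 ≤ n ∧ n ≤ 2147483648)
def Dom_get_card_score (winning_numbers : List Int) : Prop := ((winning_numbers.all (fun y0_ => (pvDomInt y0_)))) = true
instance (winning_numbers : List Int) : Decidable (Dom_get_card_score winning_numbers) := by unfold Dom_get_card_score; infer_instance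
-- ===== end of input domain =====

-- B replaces A's accumulator loop with the closed form 2^(n-1) (0 for the empty list): simpler, no loop.

-- ===== PORT A =====
-- score = 0; for i in range(len(ws)): if i == 0: score += 1 else: score *= 2; return score
def get_card_score (winning_numbers : List Int) : Int :=
  (PySem.List.pyRange 0 (winning_numbers.length : Int) 1).foldl
    (fun score i => if i == 0 then score + 1 else score * 2) 0

-- ===== PORT B =====
-- n = len(ws); return 0 if n == 0 else 2 ** (n - 1)
def get_card_score_alt (winning_numbers : List Int) : Int :=
  let n := winning_numbers.length
  if n == 0 then 0 else 2 ^ (n - 1)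

-- ===== PRECONDITION & SPEC =====
def Spec_get_card_score (winning_numbers : List Int) (out : Int) : Prop := out = get_card_score_alt winning_numbers
instance (winning_numbers : List Int) (out : Int) : Decidable (Spec_get_card_score winning_numbers out) := by unfold Spec_get_card_score; infer_instance

-- ===== CLAIM (what is proved, stated in full; the proofs are below) =====
def Claim_equal_get_card_score : Prop := ∀ (winning_numbers : List Int), Dom_get_card_score winning_numbers → Spec_get_card_score winning_numbers (get_card_score winning_numbers)

-- ===== LEMMAS AND PROOFS =====

theorem pv_loop_closed (n : Nat) :
    (PySem.List.pyRange 0 (n : Int) 1).foldl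
      (fun score i => if i == 0 then score + 1 else score * 2) 0
    = if n == 0 then (0 : Int) else 2 ^ (n - 1) := by
  induction n with
  | zero => simp
  | succ m ih =>
    have h : ((m : Int) + 1) = ((m + 1 : Nat) : Int) := by push_cast; ring
    rw [← h, PySem.List.pyRange_one_succ_right (by positivity), List.foldl_append, ih]
    by_cases hm : m = 0
    · subst hm; simp
    · have hk : ((m : Int) == 0) = false := by
        simp only [beq_eq_false_iff_ne]; exact_mod_cast hm
      have hms : ((m + 1 : Nat) == 0) = false := by simp
      have hm0 : ((m == 0) : Bool) = false := by simpa using hm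
      simp only [List.foldl_cons, List.foldl_nil, hk, hms, hm0, if_false, Bool.false_eq_true]
      have hp : m - 1 + 1 = m := Nat.succ_pred_eq_of_pos (Nat.pos_of_ne_zero hm)
      rw [← pow_succ, hp]; simp

-- ===== VERDICT (by name: the statement is the Claim_ definition above) =====
theorem get_card_score_spec : Claim_equal_get_card_score := by
  intro ws _
  unfold Spec_get_card_score get_card_score get_card_score_alt
  exact pv_loop_closed ws.length
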